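-- pv_equiv track=rewrite | github.com/hong56hk/echoserver | server.py | process_msg
-- ===== SOURCE A (Python) =====
-- def process_msg(msg):
--   resp = ""
--   for i in range(len(msg)):
--     c = msg[i]
--     if i%2 == 0:
--       resp += c.upper()
--     else:
--       resp += c
--   return resp
-- ===== SOURCE B (Python) =====
-- def process_msg(msg):
--     evens = msg[0::2].upper()
--     odds = msg[1::2]
--     out = []
--     for e, o in zip(evens, odds):
--         out.append(e)
--         out.append(o)
--     if len(odds) < len(evens):
--         out.append(evens[-1])
--     return "".join(out)
-- ===== Notes on version B (the rewrite author's own statement) =====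
-- stated objective: faster
-- what changed: Replaces the per-index loop with its i%2 branch and string concatenation by two bulk slice passes (msg[0::2].upper() and msg[1::2]) merged back by zipping, with the trailing even-index char appended for odd-length input.
import Mathlib
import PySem

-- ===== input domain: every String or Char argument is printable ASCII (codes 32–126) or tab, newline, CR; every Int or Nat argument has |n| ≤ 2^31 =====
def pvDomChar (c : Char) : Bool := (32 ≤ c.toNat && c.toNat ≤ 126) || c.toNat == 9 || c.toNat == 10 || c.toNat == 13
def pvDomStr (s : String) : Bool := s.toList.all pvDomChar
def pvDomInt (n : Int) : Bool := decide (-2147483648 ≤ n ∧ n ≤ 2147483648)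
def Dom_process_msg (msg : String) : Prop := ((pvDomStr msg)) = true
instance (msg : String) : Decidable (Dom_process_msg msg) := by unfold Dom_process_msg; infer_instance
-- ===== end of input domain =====

-- B replaces A's per-index loop with its i%2 branch by two bulk slice passes (msg[0::2].upper(), msg[1::2]) zipped back together; same O(n) asymptotics, measured constant-factor faster (bulk slice/upper passes instead of per-char branch and concatenation).

-- ===== PORT A =====
def process_msg (msg : String) : String :=
  String.ofList <|
    (PySem.List.pyRange 0 (PySem.Str.len msg) 1).foldl
      (fun resp i =>
        let c := PySem.List.pyGetD msg.toList i ' '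
        if PySem.Int.mod i 2 == 0 then resp ++ [PySem.Chars.upperChar c]
        else resp ++ [c]) []

-- ===== PORT B =====
def process_msg_alt (msg : String) : String :=
  let evens := PySem.Chars.upper ((PySem.List.slice? msg.toList (some 0) none 2).getD [])
  let odds := (PySem.List.slice? msg.toList (some 1) none 2).getD []
  let out := (evens.zip odds).foldl (fun acc p => acc ++ [p.1, p.2]) []
  let out := if odds.length < evens.length then out ++ [PySem.List.pyGetD evens (-1) ' '] else out
  String.ofList out

-- ===== PRECONDITION & SPEC =====
def Spec_process_msg (msg : String) (out : String) : Prop := out = process_msg_alt msg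
instance (msg : String) (out : String) : Decidable (Spec_process_msg msg out) := by unfold Spec_process_msg; infer_instance

-- ===== CLAIM (what is proved, stated in full; the proofs are below) =====
def Claim_equal_process_msg : Prop := ∀ (msg : String), Dom_process_msg msg → Spec_process_msg msg (process_msg msg)

-- ===== LEMMAS AND PROOFS =====

-- the common value: uppercase even indices, keep odd indices
def pvG : List Char → List Char
  | [] => []
  | [c] => [PySem.Chars.upperChar c]
  | c :: d :: rest => PySem.Chars.upperChar c :: d :: pvG rest

-- every second element starting at the head (what xs[0::2] computes)
def pvEveryOther : List Char → List Char
  | [] => []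
  | [x] => [x]
  | x :: _ :: rest => x :: pvEveryOther rest

lemma pvEveryOther_cons (x : Char) (l : List Char) :
    pvEveryOther (x :: l) = x :: pvEveryOther l.tail := by
  cases l <;> rfl

lemma fm_two : ∀ (n : ℕ) (xs : List Char), xs.length ≤ 2 * n →
    (List.range n).filterMap (fun k => xs[2 * k]?) = pvEveryOther xs := by
  intro n
  induction n with
  | zero =>
    intro xs h
    have : xs = [] := by
      cases xs with
      | nil => rfl
      | cons a b => simp at h
    subst this; rfl
  | succ n ih =>
    intro xs h
    rw [List.range_succ_eq_map, List.filterMap_cons, List.filterMap_map]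
    have hfun : ((fun k => xs[2 * k]?) ∘ Nat.succ) = (fun k => (xs.drop 2)[2 * k]?) := by
      funext k
      simp only [Function.comp]
      rw [List.getElem?_drop]
      congr 1
      omega
    rw [hfun, ih (xs.drop 2) (by simp; omega)]
    cases xs with
    | nil => simp [pvEveryOther]
    | cons x rest =>
      simp only [List.getElem?_cons_zero, Nat.mul_zero]
      rw [pvEveryOther_cons]
      simp [List.drop_one]

lemma slice0 (cs : List Char) :
    PySem.List.slice? cs (some 0) none 2 = some (pvEveryOther cs) := by
  simp [PySem.List.slice?, PySem.List.sliceIndices]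
  have h1 : (if 0 < cs.length then (((cs.length:ℤ) + 2 - 1)/2).toNat else 0) = (cs.length+1)/2 := by
    split_ifs <;> omega
  have h2 : (fun x : ℕ => cs[((2:ℤ)*↑x).toNat]?) = (fun k => cs[2*k]?) := by
    funext k
    have hk : ((2:ℤ)*↑k).toNat = 2*k := by omega
    rw [hk]
  rw [h1, h2, fm_two ((cs.length+1)/2) cs (by omega)]

lemma slice1 (cs : List Char) :
    PySem.List.slice? cs (some 1) none 2 = some (pvEveryOther cs.tail) := by
  cases cs with
  | nil => rfl
  | cons c rest =>
    simp [PySem.List.slice?, PySem.List.sliceIndices]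
    have h1 : (if 0 < rest.length then (((rest.length:ℤ) + 2 - 1)/2).toNat else 0) = (rest.length+1)/2 := by
      split_ifs <;> omega
    have h2 : (fun x : ℕ => (c::rest)[((1:ℤ) + 2*↑x).toNat]?) = (fun x => rest[2*x]?) := by
      funext k
      have hk : ((1:ℤ) + 2*↑k).toNat = 2*k+1 := by omega
      rw [hk, List.getElem?_cons_succ]
    rw [h1, h2, fm_two ((rest.length+1)/2) rest (by omega)]

lemma pyGetD_neg_one_single (x : Char) (d : Char) :
    PySem.List.pyGetD [x] (-1) d = x := by
  simp [PySem.List.pyGetD, PySem.List.pyGet?, PySem.List.pyIdx?]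

lemma pyGetD_neg_one_cons (x : Char) (xs : List Char) (d : Char) (h : xs ≠ []) :
    PySem.List.pyGetD (x :: xs) (-1) d = PySem.List.pyGetD xs (-1) d := by
  cases xs with
  | nil => simp at h
  | cons y ys =>
    simp [PySem.List.pyGetD, PySem.List.pyGet?, PySem.List.pyIdx?]
    rfl

lemma enum_flat : ∀ (cs : List Char) (a : ℤ), PySem.Int.mod a 2 = 0 →
    (PySem.List.enumerate cs a).flatMap
      (fun p => if PySem.Int.mod p.1 2 == 0 then [PySem.Chars.upperChar p.2] else [p.2])
      = pvG cs
  | [], a, h => by simp [PySem.List.enumerate, pvG]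
  | [c], a, h => by
    simp [PySem.List.enumerate, pvG, PySem.Int.mod] at *
    simp [h]
  | c :: d :: rest, a, h => by
    rw [PySem.List.enumerate_cons, PySem.List.enumerate_cons]
    simp only [List.flatMap_cons]
    have h1 : (PySem.Int.mod a 2 == 0) = true := by
      simp [PySem.Int.mod] at h ⊢
      omega
    have h2 : (PySem.Int.mod (a+1) 2 == 0) = false := by
      simp only [PySem.Int.mod] at h ⊢
      simp [Int.fmod_eq_emod] at *
      omega
    have h3 : PySem.Int.mod (a+1+1) 2 = 0 := by
      simp only [PySem.Int.mod] at h ⊢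
      simp [Int.fmod_eq_emod] at *
      omega
    simp only [h1, h2, if_true, if_false, Bool.false_eq_true]
    rw [enum_flat rest (a+1+1) h3]
    rfl

lemma A_eq (msg : String) : process_msg msg = String.ofList (pvG msg.toList) := by
  unfold process_msg
  have hf : (fun (resp : List Char) (i : ℤ) =>
        let c := PySem.List.pyGetD msg.toList i ' '
        if PySem.Int.mod i 2 == 0 then resp ++ [PySem.Chars.upperChar c] else resp ++ [c])
      = (fun (resp : List Char) (i : ℤ) => resp ++
          (if PySem.Int.mod i 2 == 0 then [PySem.Chars.upperChar (PySem.List.pyGetD msg.toList i ' ')]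
           else [PySem.List.pyGetD msg.toList i ' '])) := by
    funext resp i
    dsimp only
    split_ifs <;> rfl
  rw [hf, PySem.List.foldl_append_eq_flatMap, List.nil_append]
  have h3 : PySem.List.pyRange 0 (PySem.Str.len msg) 1
      = PySem.List.pyRange 0 (PySem.List.len msg.toList) 1 := rfl
  rw [h3]
  have h4 : List.flatMap
        (fun i => if PySem.Int.mod i 2 == 0 then [PySem.Chars.upperChar (PySem.List.pyGetD msg.toList i ' ')]
                  else [PySem.List.pyGetD msg.toList i ' '])
        (PySem.List.pyRange 0 (PySem.List.len msg.toList) 1)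
      = List.flatMap
        (fun p => if PySem.Int.mod p.1 2 == 0 then [PySem.Chars.upperChar p.2] else [p.2])
        (PySem.List.enumerate msg.toList 0) := by
    rw [PySem.List.enumerate_eq_map_pyRange msg.toList ' ', List.flatMap_map]
  rw [h4, enum_flat msg.toList 0 (by decide)]

def pvInter (E O : List Char) : List Char :=
  if O.length < E.length then
    List.flatMap (fun p : Char × Char => [p.1, p.2]) (E.zip O) ++ [PySem.List.pyGetD E (-1) ' ']
  else
    List.flatMap (fun p : Char × Char => [p.1, p.2]) (E.zip O)

lemma interB : ∀ (cs : List Char),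
    pvInter ((pvEveryOther cs).map PySem.Chars.upperChar) (pvEveryOther cs.tail) = pvG cs
  | [] => rfl
  | [c] => by
    simp [pvInter, pvEveryOther, pvG, pyGetD_neg_one_single]
  | c :: d :: rest => by
    have ih := interB rest
    show pvInter ((pvEveryOther (c :: d :: rest)).map PySem.Chars.upperChar)
        (pvEveryOther (d :: rest)) = pvG (c :: d :: rest)
    rw [pvEveryOther_cons d rest]
    show pvInter ((c :: pvEveryOther rest).map PySem.Chars.upperChar)
        (d :: pvEveryOther rest.tail) = pvG (c :: d :: rest)
    simp only [List.map_cons, pvInter, List.zip_cons_cons, List.flatMap_cons, List.length_cons,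
      Nat.add_lt_add_iff_right] at ih ⊢
    split_ifs with hc
    · have hne : (pvEveryOther rest).map PySem.Chars.upperChar ≠ [] := by
        intro he
        rw [he] at hc
        simp at hc
      rw [pyGetD_neg_one_cons _ _ _ hne]
      rw [if_pos hc] at ih
      simp only [List.cons_append, List.nil_append] at ih ⊢
      rw [ih]
      rfl
    · rw [if_neg hc] at ih
      simp only [List.cons_append, List.nil_append] at ih ⊢
      rw [ih]
      rfl

lemma B_eq (msg : String) : process_msg_alt msg = String.ofList (pvG msg.toList) := by
  unfold process_msg_alt
  rw [slice0, slice1]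
  simp only [Option.getD_some]
  rw [PySem.List.foldl_append_eq_flatMap (fun p : Char × Char => [p.1, p.2]), List.nil_append]
  have : PySem.Chars.upper (pvEveryOther msg.toList) = (pvEveryOther msg.toList).map PySem.Chars.upperChar := rfl
  rw [this]
  rw [← pvInter, interB]

-- ===== VERDICT (by name: the statement is the Claim_ definition above) =====
theorem process_msg_spec : Claim_equal_process_msg := by
  intro msg _
  unfold Spec_process_msg
  rw [A_eq, B_eq]
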